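-- pv_equiv track=rewrite | github.com/LZY-Ricardo/VidGrab-desktop | resolver/server.py | _pick_subtitle_entry
-- ===== SOURCE A (Python) =====
-- from typing import Any
--
-- def _pick_subtitle_entry(entries: Any) -> str | None:
--     if not isinstance(entries, list) or not entries:
--         return None
--
--     preferred_ext_order = ["vtt", "srt", "ttml", "srv3", "srv2", "srv1", "json3"]
--     sorted_entries = sorted(
--         entries,
--         key=lambda item: preferred_ext_order.index(item.get("ext"))
--         if item.get("ext") in preferred_ext_order
--         else len(preferred_ext_order),
--     )
--     for entry in sorted_entries:
--         subtitle_url = entry.get("url")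
--         ext = (entry.get("ext") or "").lower()
--         if ext == "xml":
--             continue
--         if subtitle_url and "comment.bilibili.com" not in str(subtitle_url):
--             return str(subtitle_url)
--     return None
-- ===== SOURCE B (Python) =====
-- def _pick_subtitle_entry(entries):
--     if not isinstance(entries, list) or not entries:
--         return None
--
--     preferred_ext_order = ["vtt", "srt", "ttml", "srv3", "srv2", "srv1", "json3"]
--     rank = {ext: i for i, ext in enumerate(preferred_ext_order)}
--     # single pass: keep the acceptable entry with the smallest rank (first one on ties)
--     best = None  # (rank, url)
--     for entry in entries:
--         ext = entry.get("ext")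
--         url = entry.get("url")
--         r = rank.get(ext, len(preferred_ext_order))
--         if (ext or "").lower() == "xml":
--             continue
--         if not url or "comment.bilibili.com" in str(url):
--             continue
--         if best is None or r < best[0]:
--             best = (r, str(url))
--     return best[1] if best is not None else None
-- ===== Notes on version B (the rewrite author's own statement) =====
-- stated objective: alternative
-- what changed: B replaces A's stable sort by preference rank followed by a scan with a single pass that looks each extension up in a rank dictionary built once and keeps the acceptable entry with the smallest rank (earliest on ties), returning its url at the end.
import Mathlib
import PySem

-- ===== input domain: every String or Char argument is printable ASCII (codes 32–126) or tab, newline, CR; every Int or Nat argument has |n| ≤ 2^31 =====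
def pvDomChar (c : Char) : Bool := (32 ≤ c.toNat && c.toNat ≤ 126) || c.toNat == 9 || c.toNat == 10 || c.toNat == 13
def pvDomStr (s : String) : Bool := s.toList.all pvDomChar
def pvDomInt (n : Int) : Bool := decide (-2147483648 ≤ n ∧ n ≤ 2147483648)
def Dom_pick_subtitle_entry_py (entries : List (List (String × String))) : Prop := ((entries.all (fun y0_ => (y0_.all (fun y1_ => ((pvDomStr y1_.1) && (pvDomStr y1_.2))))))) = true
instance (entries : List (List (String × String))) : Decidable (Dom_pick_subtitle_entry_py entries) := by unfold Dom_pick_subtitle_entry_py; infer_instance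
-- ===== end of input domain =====

-- B replaces A's stable sort + scan with a single pass that keeps the acceptable
-- entry of smallest preference rank (rank looked up in a dict built once).

-- ===== PORT A =====
def pvPrefA : List String := ["vtt", "srt", "ttml", "srv3", "srv2", "srv1", "json3"]

-- key=lambda item: preferred.index(item.get("ext")) if item.get("ext") in preferred else len(preferred)
def pvKeyA (item : List (String × String)) : Nat :=
  match (PySem.Dict.mk item).get? "ext" with
  | some s => if s ∈ pvPrefA then (PySem.List.index? pvPrefA s).getD 7 else 7
  | none => 7

-- the 'for entry in sorted_entries' loop of A
def pvLoopA : List (List (String × String)) → Option String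
  | [] => none
  | entry :: rest =>
      let url? := (PySem.Dict.mk entry).get? "url"
      let ext := PySem.Str.lower (((PySem.Dict.mk entry).get? "ext").getD "")
      if ext == "xml" then pvLoopA rest
      else
        match url? with
        | some url =>
            if url ≠ "" ∧ PySem.Str.isIn "comment.bilibili.com" url = false then some url
            else pvLoopA rest
        | none => pvLoopA rest

def pick_subtitle_entry_py (entries : List (List (String × String))) : Option String :=
  if entries.isEmpty then none
  else pvLoopA (PySem.List.sorted entries pvKeyA false)

-- ===== PORT B =====
def pvPrefB : List String := ["vtt", "srt", "ttml", "srv3", "srv2", "srv1", "json3"]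

-- rank = {ext: i for i, ext in enumerate(preferred_ext_order)}
def pvRankB : PySem.Dict String Nat :=
  PySem.Dict.ofList ((PySem.List.enumerate pvPrefB).map (fun p => (p.2, p.1.toNat)))

-- one iteration of B's 'for entry in entries' loop, updating best = (rank, url)
def pvStepB (best : Option (Nat × String)) (entry : List (String × String)) : Option (Nat × String) :=
  let ext? := (PySem.Dict.mk entry).get? "ext"
  let url? := (PySem.Dict.mk entry).get? "url"
  let r : Nat := match ext? with
    | some s => pvRankB.getD s pvPrefB.length
    | none => pvPrefB.length
  if PySem.Str.lower (ext?.getD "") == "xml" then best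
  else match url? with
    | none => best
    | some url =>
        if url == "" || PySem.Str.isIn "comment.bilibili.com" url then best
        else match best with
          | none => some (r, url)
          | some b => if r < b.1 then some (r, url) else best

def pick_subtitle_entry_py_alt (entries : List (List (String × String))) : Option String :=
  if entries.isEmpty then none
  else match entries.foldl pvStepB none with
    | some b => some b.2
    | none => none

-- ===== PRECONDITION & SPEC =====
def Spec_pick_subtitle_entry_py (entries : List (List (String × String))) (out : Option String) : Prop := out = pick_subtitle_entry_py_alt entries
instance (entries : List (List (String × String))) (out : Option String) : Decidable (Spec_pick_subtitle_entry_py entries out) := by unfold Spec_pick_subtitle_entry_py; infer_instance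

-- ===== CLAIM (what is proved, stated in full; the proofs are below) =====
def Claim_equal_pick_subtitle_entry_py : Prop := ∀ (entries : List (List (String × String))), Dom_pick_subtitle_entry_py entries → Spec_pick_subtitle_entry_py entries (pick_subtitle_entry_py entries)

-- ===== LEMMAS AND PROOFS =====

-- 'acceptability' filter: the url A's scan would accept at this entry, if any
def pvF (entry : List (String × String)) : Option String :=
  let url? := (PySem.Dict.mk entry).get? "url"
  let ext := PySem.Str.lower (((PySem.Dict.mk entry).get? "ext").getD "")
  if ext == "xml" then none
  else match url? with
    | some url =>
        if url ≠ "" ∧ PySem.Str.isIn "comment.bilibili.com" url = false then some url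
        else none
    | none => none

def pvN (entry : List (String × String)) : Option (Nat × String) :=
  (pvF entry).map (fun u => (pvKeyA entry, u))

-- 'min with leftmost tie-break' combinator and the minimum it computes
def pvComb (a b : Option (Nat × String)) : Option (Nat × String) :=
  match a, b with
  | none, b => b
  | some a, none => some a
  | some a, some b => if b.1 < a.1 then some b else some a

def pvM : List (List (String × String)) → Option (Nat × String)
  | [] => none
  | x :: es => pvComb (pvN x) (pvM es)

theorem pvKey_le (e : List (String × String)) : pvKeyA e ≤ 7 := by
  unfold pvKeyA
  cases h : (PySem.Dict.mk e).get? "ext" with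
  | none => simp
  | some s =>
      simp only
      split_ifs with hm
      · simp only [pvPrefA, List.mem_cons, List.not_mem_nil, or_false] at hm
        rcases hm with rfl | rfl | rfl | rfl | rfl | rfl | rfl <;> decide
      · simp

-- B's dict lookup computes A's sort key
theorem pvRank_eq (s : String) :
    pvRankB.getD s pvPrefB.length
      = (if s ∈ pvPrefA then (PySem.List.index? pvPrefA s).getD 7 else 7) := by
  by_cases h1 : s = "vtt"; · subst h1; decide
  by_cases h2 : s = "srt"; · subst h2; decide
  by_cases h3 : s = "ttml"; · subst h3; decide
  by_cases h4 : s = "srv3"; · subst h4; decide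
  by_cases h5 : s = "srv2"; · subst h5; decide
  by_cases h6 : s = "srv1"; · subst h6; decide
  by_cases h7 : s = "json3"; · subst h7; decide
  have hmem : s ∉ pvPrefA := by
    simp only [pvPrefA, List.mem_cons, List.not_mem_nil, or_false]
    tauto
  rw [if_neg hmem]
  have hd : pvRankB = PySem.Dict.mk [("vtt",0),("srt",1),("ttml",2),("srv3",3),("srv2",4),("srv1",5),("json3",6)] := by decide
  rw [hd]
  simp [PySem.Dict.getD, PySem.Dict.get?, List.find?,
    beq_eq_false_iff_ne.mpr (Ne.symm h1), beq_eq_false_iff_ne.mpr (Ne.symm h2),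
    beq_eq_false_iff_ne.mpr (Ne.symm h3), beq_eq_false_iff_ne.mpr (Ne.symm h4),
    beq_eq_false_iff_ne.mpr (Ne.symm h5), beq_eq_false_iff_ne.mpr (Ne.symm h6),
    beq_eq_false_iff_ne.mpr (Ne.symm h7), pvPrefB]

theorem pvR_eq (e : List (String × String)) :
    (match (PySem.Dict.mk e).get? "ext" with
      | some s => pvRankB.getD s pvPrefB.length
      | none => pvPrefB.length) = pvKeyA e := by
  unfold pvKeyA
  cases (PySem.Dict.mk e).get? "ext" with
  | none => rfl
  | some s => simpa using pvRank_eq s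

-- one step of B's fold is the combinator applied to the entry's contribution
theorem pvStepB_eq (best : Option (Nat × String)) (e : List (String × String)) :
    pvStepB best e = pvComb best (pvN e) := by
  simp only [pvStepB, pvN, pvF]
  rw [pvR_eq]
  by_cases hxml : (PySem.Str.lower (((PySem.Dict.mk e).get? "ext").getD "") == "xml") = true
  · simp only [hxml, if_pos]
    cases best <;> simp [pvComb]
  · simp only [hxml, Bool.false_eq_true]
    cases hu : (PySem.Dict.mk e).get? "url" with
    | none => cases best <;> simp [pvComb]
    | some url =>
        simp only
        by_cases h0 : url = ""
        · subst h0; cases best <;> simp [pvComb]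
        · by_cases hc : PySem.Str.isIn "comment.bilibili.com" url = true
          · simp only [hc]
            cases best <;> simp [pvComb]
          · simp only [Bool.not_eq_true, PySem.Str.isIn,
              show "comment.bilibili.com".toList = ['c','o','m','m','e','n','t','.','b','i','l','i','b','i','l','i','.','c','o','m'] from rfl] at hc
            cases best <;> simp [pvComb, hc, h0]

theorem pvComb_none (a : Option (Nat × String)) : pvComb a none = a := by
  cases a <;> rfl

theorem pvComb_assoc (a b c : Option (Nat × String)) :
    pvComb (pvComb a b) c = pvComb a (pvComb b c) := by
  cases a <;> cases b <;> cases c <;> simp only [pvComb] <;> split_ifs <;>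
    first | rfl | omega | (dsimp only [pvComb]; split_ifs <;> first | rfl | omega)

-- B's fold computes the combinator-minimum over the entries
theorem pvFold_eq (es : List (List (String × String))) (acc : Option (Nat × String)) :
    es.foldl pvStepB acc = pvComb acc (pvM es) := by
  induction es generalizing acc with
  | nil => simp [pvM, pvComb_none]
  | cons x es ih => simp only [List.foldl_cons, pvM, ih, pvStepB_eq, pvComb_assoc]

-- A's scan is findSome? of the acceptability filter
theorem pvLoopA_eq (l : List (List (String × String))) : pvLoopA l = l.findSome? pvF := by
  induction l with
  | nil => rfl
  | cons e rest ih =>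
      simp only [pvLoopA, pvF, List.findSome?]
      split_ifs
      · simpa using ih
      · cases (PySem.Dict.mk e).get? "url" with
        | none => simpa using ih
        | some url => simp only; split_ifs <;> simp [ih]

-- the per-rank-bucket scan result
def pvG (es : List (List (String × String))) (is : List Nat) : Option (Nat × String) :=
  is.findSome? (fun i => ((es.filter (fun e => pvKeyA e == i)).findSome? pvF).map (fun u => (i, u)))

theorem pvG_mem (es : List (List (String × String))) (is : List Nat) (p : Nat × String)
    (h : pvG es is = some p) : p.1 ∈ is := by
  induction is with
  | nil => simp [pvG] at h
  | cons i t ih =>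
      simp only [pvG, List.findSome?] at h
      cases hb : ((es.filter (fun e => pvKeyA e == i)).findSome? pvF).map (fun u => (i, u)) with
      | none => rw [hb] at h; exact List.mem_cons_of_mem _ (ih h)
      | some q =>
          rw [hb] at h
          cases h
          rcases Option.map_eq_some_iff.mp hb with ⟨u, _, rfl⟩
          simp

theorem pvG_skip (x : List (String × String)) (es : List (List (String × String)))
    (is : List Nat) (h : pvKeyA x ∉ is) :
    pvG (x :: es) is = pvG es is := by
  induction is with
  | nil => rfl
  | cons i t ih =>
      have hki : pvKeyA x ≠ i := fun hx => h (hx ▸ List.mem_cons_self)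
      have hf : List.filter (fun e => pvKeyA e == i) (x :: es)
          = List.filter (fun e => pvKeyA e == i) es := by
        rw [List.filter_cons]
        simp [hki]
      simp only [pvG, List.findSome?, hf] at *
      cases ((es.filter (fun e => pvKeyA e == i)).findSome? pvF).map (fun u => (i, u)) with
      | some q => rfl
      | none => exact ih (fun hx => h (List.mem_cons_of_mem _ hx))

theorem pvG_unfold (es : List (List (String × String))) (i : Nat) (t : List Nat) :
    pvG es (i :: t)
      = (((es.filter (fun e => pvKeyA e == i)).findSome? pvF).map (fun u => (i, u))).or
          (pvG es t) := by
  simp only [pvG, List.findSome?_cons]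
  cases ((es.filter (fun e => pvKeyA e == i)).findSome? pvF).map (fun u => (i, u)) <;>
    simp [Option.or]

-- prepending one entry combines its contribution into the bucket minimum
theorem pvG_cons (x : List (String × String)) (es : List (List (String × String)))
    (is : List Nat) (hs : is.Pairwise (· < ·)) (hm : pvKeyA x ∈ is) :
    pvG (x :: es) is = pvComb (pvN x) (pvG es is) := by
  induction is with
  | nil => simp at hm
  | cons i t ih =>
      have hlt : ∀ j ∈ t, i < j := fun j hj => (List.pairwise_cons.mp hs).1 j hj
      have hs' := (List.pairwise_cons.mp hs).2
      rw [pvG_unfold, pvG_unfold]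
      by_cases hk : pvKeyA x = i
      · have hxt : pvKeyA x ∉ t := fun hx => absurd (hk ▸ hlt _ hx) (by omega)
        have hf : List.filter (fun e => pvKeyA e == i) (x :: es)
            = x :: List.filter (fun e => pvKeyA e == i) es := by
          rw [List.filter_cons]; simp [hk]
        rw [hf, pvG_skip x es t hxt]
        cases hfx : pvF x with
        | none =>
            have hN : pvN x = none := by simp [pvN, hfx]
            rw [List.findSome?_cons, hfx, hN]
            rfl
        | some u =>
            have hN : pvN x = some (i, u) := by simp [pvN, hfx, hk]
            rw [List.findSome?_cons, hfx, hN]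
            simp only [Option.map_some, Option.or]
            cases hb : ((es.filter (fun e => pvKeyA e == i)).findSome? pvF).map
                (fun u => (i, u)) with
            | some q =>
                rcases Option.map_eq_some_iff.mp hb with ⟨v, hv, rfl⟩
                simp [pvComb]
            | none =>
                cases hg : pvG es t with
                | none => rfl
                | some q =>
                    have hq : i < q.1 := hlt _ (pvG_mem es t q hg)
                    simp only [pvComb]
                    rw [if_neg (by omega)]
      · have hf : List.filter (fun e => pvKeyA e == i) (x :: es)
            = List.filter (fun e => pvKeyA e == i) es := by
          rw [List.filter_cons]; simp [hk]
        have hm' : pvKeyA x ∈ t := by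
          rcases List.mem_cons.mp hm with h | h
          · exact absurd h hk
          · exact h
        rw [hf]
        cases hb : ((es.filter (fun e => pvKeyA e == i)).findSome? pvF).map (fun u => (i, u)) with
        | none => exact ih hs' hm'
        | some q =>
            rcases Option.map_eq_some_iff.mp hb with ⟨u, hu, rfl⟩
            have hik : i < pvKeyA x := hlt _ hm'
            cases hfx : pvF x with
            | none => simp [pvN, hfx, pvComb]
            | some v =>
                have hN : pvN x = some (pvKeyA x, v) := by simp [pvN, hfx]
                simp only [hN, Option.or, pvComb]
                rw [if_pos (by omega)]

-- the bucket minimum over ranks 0..7 is B's combinator-minimum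
theorem pvG_eq_pvM (es : List (List (String × String))) : pvG es (List.range 8) = pvM es := by
  induction es with
  | nil => simp [pvG, pvM]
  | cons x t ih =>
      rw [pvM, ← ih]
      exact pvG_cons x t (List.range 8) (List.pairwise_lt_range) (by
        have := pvKey_le x
        simp only [List.mem_range]
        omega)

-- scanning the flattened buckets returns the snd of the bucket minimum
theorem pvFind_flat (es : List (List (String × String))) (is : List Nat) :
    ((is.flatMap (fun i => es.filter (fun e => pvKeyA e == i))).findSome? pvF)
      = (pvG es is).map Prod.snd := by
  induction is with
  | nil => simp [pvG]
  | cons i t ih =>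
      rw [List.flatMap_cons, List.findSome?_append, pvG_unfold, ih]
      cases hb : (es.filter (fun e => pvKeyA e == i)).findSome? pvF with
      | none => simp [Option.or]
      | some u => simp [Option.or]

-- ----- A's stable sort is the bucket concatenation -----
theorem pvInsertBy_skip {α : Type} (before : α → α → Bool) (x : α) (l1 l2 : List α)
    (h : ∀ y ∈ l1, before x y = false) :
    PySem.List.insertBy before x (l1 ++ l2) = l1 ++ PySem.List.insertBy before x l2 := by
  induction l1 with
  | nil => rfl
  | cons a t ih =>
      have ha : before x a = false := h a (by simp)
      cases l2 with
      | nil =>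
          simp only [List.cons_append, PySem.List.insertBy, ha]
          simp only [Bool.false_eq_true, if_false]
          rw [show t ++ [] = t ++ ([] : List α) from rfl] at ih
          simpa using ih (fun y hy => h y (by simp [hy]))
      | cons b t2 =>
          simp only [List.cons_append, PySem.List.insertBy, ha]
          simp only [Bool.false_eq_true, if_false]
          have := ih (fun y hy => h y (by simp [hy]))
          simpa [PySem.List.insertBy] using this

theorem pvInsertBy_front {α : Type} (before : α → α → Bool) (x : α) (l : List α)
    (h : ∀ y ∈ l, before x y = true) :
    PySem.List.insertBy before x l = x :: l := by
  cases l with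
  | nil => rfl
  | cons a t => simp [PySem.List.insertBy, h a (by simp)]

theorem pvInsert_flat (x : List (String × String)) (es : List (List (String × String)))
    (n start : Nat) (h1 : start ≤ pvKeyA x) (h2 : pvKeyA x < start + n) :
    PySem.List.insertBy (fun a b => decide (pvKeyA a < pvKeyA b)) x
        ((List.range' start n).flatMap (fun i => es.filter (fun e => pvKeyA e == i)))
      = (List.range' start n).flatMap (fun i => (es ++ [x]).filter (fun e => pvKeyA e == i)) := by
  induction n generalizing start with
  | zero => omega
  | succ n ih =>
      rw [List.range'_succ]
      simp only [List.flatMap_cons, List.filter_append]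
      have hgt : ∀ i ∈ List.range' (start + 1) n, start < i := by
        intro i hi
        obtain ⟨j, hjn, rfl⟩ := List.mem_range'.mp hi
        omega
      by_cases hk : pvKeyA x = start
      · have hx : List.filter (fun e => pvKeyA e == start) [x] = [x] := by simp [hk]
        have htail : (List.range' (start + 1) n).flatMap
              (fun i => es.filter (fun e => pvKeyA e == i) ++ List.filter (fun e => pvKeyA e == i) [x])
            = (List.range' (start + 1) n).flatMap (fun i => es.filter (fun e => pvKeyA e == i)) := by
          apply List.flatMap_congr
          intro i hi
          have hik := hgt i hi
          have hfx : List.filter (fun e => pvKeyA e == i) [x] = [] := by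
            have : (pvKeyA x == i) = false := by simp; omega
            simp [List.filter, this]
          simp [hfx]
        rw [pvInsertBy_skip _ _ _ _ (by
          intro y hy
          have := (List.mem_filter.mp hy).2
          simp only [beq_iff_eq] at this
          simp [this, hk])]
        rw [pvInsertBy_front _ _ _ (by
          intro y hy
          rcases List.mem_flatMap.mp hy with ⟨i, hi, hyf⟩
          have hik := hgt i hi
          have := (List.mem_filter.mp hyf).2
          simp only [beq_iff_eq] at this
          simp only [decide_eq_true_eq]
          omega)]
        rw [htail, hx]
        simp
      · have hne : start < pvKeyA x := by omega
        have hx0 : List.filter (fun e => pvKeyA e == start) [x] = [] := by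
          have : (pvKeyA x == start) = false := by simp; omega
          simp [List.filter, this]
        rw [pvInsertBy_skip _ _ _ _ (by
          intro y hy
          have := (List.mem_filter.mp hy).2
          simp only [beq_iff_eq] at this
          simp only [decide_eq_false_iff_not, not_lt]
          omega)]
        rw [ih (start + 1) (by omega) (by omega), hx0]
        simp

theorem pvSorted_eq_flat (es : List (List (String × String))) :
    PySem.List.sorted es pvKeyA false
      = (List.range 8).flatMap (fun i => es.filter (fun e => pvKeyA e == i)) := by
  rw [List.range_eq_range']
  induction es using List.reverseRecOn with
  | nil => simp [PySem.List.sorted_eq_foldl_insertBy]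
  | append_singleton es x ih =>
      rw [PySem.List.sorted_eq_foldl_insertBy] at *
      rw [List.foldl_append, List.foldl_cons, List.foldl_nil, ih]
      exact pvInsert_flat x es 8 0 (Nat.zero_le _) (by have := pvKey_le x; omega)

-- ===== VERDICT (by name: the statement is the Claim_ definition above) =====
theorem pick_subtitle_entry_py_spec : Claim_equal_pick_subtitle_entry_py := by
  intro entries _
  unfold Spec_pick_subtitle_entry_py pick_subtitle_entry_py pick_subtitle_entry_py_alt
  by_cases he : entries.isEmpty
  · simp [he]
  · simp only [he, Bool.false_eq_true, if_false]
    rw [pvSorted_eq_flat, pvLoopA_eq, pvFind_flat, pvG_eq_pvM, pvFold_eq]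
    simp only [pvComb]
    cases pvM entries <;> simp
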